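-- pv_equiv track=rewrite | github.com/mctinker/Map-Tasker | maptasker/src/diagram.py | fill_line_with_arrows
-- ===== SOURCE A (Python) =====
-- bar = "│"
--
-- straight_line = "─"
--
-- def fill_line_with_arrows(line: str, arrow: str, line_length: int, call_task_position: int) -> str:
--     """
--     Fills spaces in a line with left/right arrows up to a specified position.
--     Args:
--         line: String to fill with arrows
--         arrow: Arrow character to use for filling
--         line_length: Desired length of output line
--         call_task_position: Position to fill arrows up to
--     Returns:
--         output: String with spaces filled with arrows up to call_task_position
--     Processing Logic:
--         - Pad input line with spaces to specified line_length
--         - Initialize output string with padded line up to call_task_position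
--         - Iterate through padded_line from call_task_position + 1 to end
--         - Add arrow to output if character is a space
--         - Otherwise add character from padded_line
--     """
--
--     # Pad input string with spaces to specified length
--     padded_line = line.ljust(line_length)
--
--     # Initialize output string
--     output = padded_line[:call_task_position]
--
--     # Fill spaces between call task position and end with left/right arrows
--     len_padding = len(padded_line)
--     if len_padding > call_task_position + 1:
--         for i in range(call_task_position + 1, len_padding):
--             # Only do arrow if first or last position.
--             if (
--                 (i == call_task_position + 1 or i == len_padding)
--                 and padded_line[i] == " "
--                 and bar not in padded_line[i]
--             ):
--                 output += arrow
--             # If not first or last position, and character is a space, add straight line.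
--             elif padded_line[i] == " " and bar not in padded_line[i]:
--                 output += straight_line
--             # Just add the padding character (spaces and bars)
--             else:
--                 output += padded_line[i]
--     else:
--         output = padded_line
--
--     return output
-- ===== SOURCE B (Python) =====
-- straight_line = "─"
--
-- def fill_line_with_arrows(line: str, arrow: str, line_length: int, call_task_position: int) -> str:
--     # Slice-based rewrite: prefix, special-cased first tail char, bulk replace for the rest.
--     padded_line = line.ljust(line_length)
--     if len(padded_line) <= call_task_position + 1:
--         return padded_line
--     prefix = padded_line[:call_task_position]
--     tail = padded_line[call_task_position + 1 :]
--     first = arrow if tail[:1] == " " else tail[:1]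
--     return prefix + first + tail[1:].replace(" ", straight_line)
-- ===== Notes on version B (the rewrite author's own statement) =====
-- stated objective: simpler
-- what changed: Replaces A's per-index loop with its positional branch tests by three slices: the prefix, a special-cased first tail character, and one bulk str.replace of spaces in the rest of the tail (the bulk replace runs in C, removing the per-character Python-level loop).
-- intended difference: For call_task_position <= -2 (where A still returns), A's negative loop indices wrap around the padded line so A returns the line's tail re-read plus the whole line again (longer than the line); B applies Python slice semantics uniformly and returns the consistent prefix+first+filled-tail string, the intended reading of 'fill up to the position'. — e.g. on fill_line_with_arrows("ab", ">", 0, -2): A returns "bab", B returns "b"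
import Mathlib
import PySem

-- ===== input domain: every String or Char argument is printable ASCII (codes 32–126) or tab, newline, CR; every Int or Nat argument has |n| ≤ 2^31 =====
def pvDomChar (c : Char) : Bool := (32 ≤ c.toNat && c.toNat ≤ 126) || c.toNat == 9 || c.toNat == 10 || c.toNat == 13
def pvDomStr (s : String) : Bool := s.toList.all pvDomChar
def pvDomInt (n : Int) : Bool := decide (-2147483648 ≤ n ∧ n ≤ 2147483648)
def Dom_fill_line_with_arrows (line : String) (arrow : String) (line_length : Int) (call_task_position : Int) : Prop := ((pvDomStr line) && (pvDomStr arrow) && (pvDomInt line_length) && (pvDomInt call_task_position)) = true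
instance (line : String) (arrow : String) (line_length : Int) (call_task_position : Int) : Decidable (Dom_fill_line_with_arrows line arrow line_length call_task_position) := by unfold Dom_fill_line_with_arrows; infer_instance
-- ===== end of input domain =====

-- B replaces A's per-index loop (with its positional branch conditions) by slicing plus one bulk
-- replace: prefix, a special-cased first tail character, and tail[1:].replace(" ", "─"); objective: simpler.

-- line.ljust(w): pad on the right with spaces to width w (exact: Python keeps line unchanged when w ≤ len(line),
-- which the toNat clamp reproduces). Both Pythons call str.ljust; both ports share this transliteration of it.
def pvLjust (line : String) (w : Int) : List Char :=
  line.toList ++ List.replicate (w - (line.toList.length : Int)).toNat ' '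

-- ===== PORT A =====
def fill_line_with_arrows (line : String) (arrow : String) (line_length : Int) (call_task_position : Int) : String :=
  let padded_line : List Char := pvLjust line line_length
  let output := PySem.List.slice padded_line none (some call_task_position)
  let len_padding : Int := (padded_line.length : Int)
  if len_padding > call_task_position + 1 then
    String.ofList <|
      (PySem.List.pyRange (call_task_position + 1) len_padding 1).foldl
        (fun acc i =>
          let c := PySem.List.pyGetD padded_line i ' '  -- padded_line[i]; in range inside Pre_
          -- 'bar not in padded_line[i]' on the one-char string padded_line[i] is c ≠ '│' (exact)
          if (i == call_task_position + 1 || i == len_padding) && (c == ' ' && !(c == '│')) then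
            acc ++ arrow.toList
          else if c == ' ' && !(c == '│') then
            acc ++ ['─']
          else
            acc ++ [c])
        output
  else
    String.ofList padded_line

-- ===== PORT B =====
def fill_line_with_arrows_alt (line : String) (arrow : String) (line_length : Int) (call_task_position : Int) : String :=
  let padded_line : List Char := pvLjust line line_length
  if (padded_line.length : Int) ≤ call_task_position + 1 then
    String.ofList padded_line
  else
    let pre := PySem.List.slice padded_line none (some call_task_position)
    let tail := PySem.List.slice padded_line (some (call_task_position + 1)) none
    let first := if PySem.List.slice tail none (some 1) = [' '] then arrow.toList
                 else PySem.List.slice tail none (some 1)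
    String.ofList (pre ++ first ++ PySem.Chars.replace (PySem.List.slice tail (some 1) none) [' '] ['─'])

-- ===== PRECONDITION & SPEC =====
-- Pre_ excludes exactly the inputs where A raises IndexError: call_task_position+1 below
-- -len(padded_line) makes the loop's first negative index out of range.
def Pre_fill_line_with_arrows (line : String) (arrow : String) (line_length : Int) (call_task_position : Int) : Prop :=
  -(max (line.toList.length : Int) line_length) ≤ call_task_position + 1
instance (line : String) (arrow : String) (line_length : Int) (call_task_position : Int) : Decidable (Pre_fill_line_with_arrows line arrow line_length call_task_position) := by unfold Pre_fill_line_with_arrows; infer_instance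

def pvWitness_fill_line_with_arrows : String × String × Int × Int := ("Task", "-->", 10, 4)

-- On call_task_position ≤ -2 (that A still returns on), A's negative loop indices wrap around the padded
-- line, so A returns the padded line's tail re-read plus the whole line again (longer than the line itself);
-- B treats the position by Python slice semantics and returns the consistent prefix+arrows string, which is
-- the intended reading of "fill up to the position".
def D_fill_line_with_arrows (line : String) (arrow : String) (line_length : Int) (call_task_position : Int) : Prop :=
  call_task_position ≤ -2
instance (line : String) (arrow : String) (line_length : Int) (call_task_position : Int) : Decidable (D_fill_line_with_arrows line arrow line_length call_task_position) := by unfold D_fill_line_with_arrows; infer_instance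

def Spec_fill_line_with_arrows (line : String) (arrow : String) (line_length : Int) (call_task_position : Int) (out : String) : Prop := ¬ D_fill_line_with_arrows line arrow line_length call_task_position → out = fill_line_with_arrows_alt line arrow line_length call_task_position
instance (line : String) (arrow : String) (line_length : Int) (call_task_position : Int) (out : String) : Decidable (Spec_fill_line_with_arrows line arrow line_length call_task_position out) := by unfold Spec_fill_line_with_arrows; infer_instance

def pvDiffWitness_fill_line_with_arrows : String × String × Int × Int := ("ab", ">", 0, -2)
def pvDiffWitnessOut_fill_line_with_arrows : String × String := ("bab", "b")

-- ===== CLAIM (what is proved, stated in full; the proofs are below) =====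
def Claim_unchanged_fill_line_with_arrows : Prop := ∀ (line : String) (arrow : String) (line_length : Int) (call_task_position : Int), Dom_fill_line_with_arrows line arrow line_length call_task_position → Pre_fill_line_with_arrows line arrow line_length call_task_position → Spec_fill_line_with_arrows line arrow line_length call_task_position (fill_line_with_arrows line arrow line_length call_task_position)
def Claim_changed_fill_line_with_arrows : Prop := Dom_fill_line_with_arrows (pvDiffWitness_fill_line_with_arrows.1) (pvDiffWitness_fill_line_with_arrows.2.1) (pvDiffWitness_fill_line_with_arrows.2.2.1) (pvDiffWitness_fill_line_with_arrows.2.2.2) ∧ Pre_fill_line_with_arrows (pvDiffWitness_fill_line_with_arrows.1) (pvDiffWitness_fill_line_with_arrows.2.1) (pvDiffWitness_fill_line_with_arrows.2.2.1) (pvDiffWitness_fill_line_with_arrows.2.2.2) ∧ D_fill_line_with_arrows (pvDiffWitness_fill_line_with_arrows.1) (pvDiffWitness_fill_line_with_arrows.2.1) (pvDiffWitness_fill_line_with_arrows.2.2.1) (pvDiffWitness_fill_line_with_arrows.2.2.2) ∧ fill_line_with_arrows (pvDiffWitness_fill_line_with_arrows.1) (pvDiffWitness_fill_line_with_arrows.2.1)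 (pvDiffWitness_fill_line_with_arrows.2.2.1) (pvDiffWitness_fill_line_with_arrows.2.2.2) = pvDiffWitnessOut_fill_line_with_arrows.1 ∧ fill_line_with_arrows_alt (pvDiffWitness_fill_line_with_arrows.1) (pvDiffWitness_fill_line_with_arrows.2.1) (pvDiffWitness_fill_line_with_arrows.2.2.1) (pvDiffWitness_fill_line_with_arrows.2.2.2) = pvDiffWitnessOut_fill_line_with_arrows.2 ∧ pvDiffWitnessOut_fill_line_with_arrows.1 ≠ pvDiffWitnessOut_fill_line_with_arrows.2
def Claim_exact_fill_line_with_arrows : Prop := ∀ (line : String) (arrow : String) (line_length : Int) (call_task_position : Int), Dom_fill_line_with_arrows line arrow line_length call_task_position → Pre_fill_line_with_arrows line arrow line_length call_task_position → D_fill_line_with_arrows line arrow line_length call_task_position → fill_line_with_arrows line arrow line_length call_task_position ≠ fill_line_with_arrows_alt line arrow line_length call_task_position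

-- ===== LEMMAS AND PROOFS =====

-- Chars.replace with one-char old/new is the per-character map (the fact the proof needs about Source B's replace)
theorem pv_go_single (fuel : Nat) : ∀ (l acc : List Char), l.length ≤ fuel →
    PySem.Chars.replace.go [' '] ['─'] fuel l acc
      = acc.reverse ++ l.map (fun c => if c = ' ' then '─' else c) := by
  induction fuel with
  | zero =>
    intro l acc h
    have : l = [] := List.eq_nil_of_length_eq_zero (Nat.le_zero.mp h)
    subst this; simp [PySem.Chars.replace.go]
  | succ n ih =>
    intro l acc h
    cases l with
    | nil => simp [PySem.Chars.replace.go]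
    | cons c t =>
      simp only [PySem.Chars.replace.go]
      by_cases hc : c = ' '
      · subst hc
        simp only [List.isPrefixOf]
        rw [if_pos (by simp)]
        rw [ih _ _ (by simpa using Nat.le_of_succ_le_succ h)]
        simp
      · rw [if_neg (by simp [List.isPrefixOf]; exact fun h => hc h.symm)]
        rw [ih _ _ (by simpa using Nat.le_of_succ_le_succ h)]
        simp [hc]

theorem pv_replace_single (s : List Char) :
    PySem.Chars.replace s [' '] ['─'] = s.map (fun c => if c = ' ' then '─' else c) := by
  simpa [PySem.Chars.replace] using pv_go_single s.length s [] (le_refl _)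

-- A's loop equals prefix ++ special-cased first char ++ mapped suffix (the heart of the equivalence)
theorem pv_core (P arrowL : List Char) (ctp : Int)
    (hpos : -1 ≤ ctp) (hlt : ctp + 1 < (P.length : Int)) :
    (PySem.List.pyRange (ctp + 1) (P.length : Int) 1).foldl
      (fun acc i =>
        let c := PySem.List.pyGetD P i ' '
        if (i == ctp + 1 || i == (P.length : Int)) && (c == ' ' && !(c == '│')) then
          acc ++ arrowL
        else if c == ' ' && !(c == '│') then acc ++ ['─'] else acc ++ [c])
      (PySem.List.slice P none (some ctp))
      = PySem.List.slice P none (some ctp)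
        ++ (if PySem.List.slice (PySem.List.slice P (some (ctp + 1)) none) none (some 1) = [' ']
            then arrowL
            else PySem.List.slice (PySem.List.slice P (some (ctp + 1)) none) none (some 1))
        ++ (PySem.List.slice (PySem.List.slice P (some (ctp + 1)) none) (some 1) none).map
             (fun c => if c = ' ' then '─' else c) := by
  have h0 : (0 : Int) ≤ ctp + 1 := by omega
  have hk : (ctp + 1).toNat < P.length := by omega
  have htail : PySem.List.slice P (some (ctp + 1)) none = List.drop (ctp + 1).toNat P :=
    PySem.List.slice_from P h0
  have hdropcons : List.drop (ctp + 1).toNat P = P[(ctp + 1).toNat] :: List.drop ((ctp + 1).toNat + 1) P :=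
    List.drop_eq_getElem_cons hk
  have hget : PySem.List.pyGetD P (ctp + 1) ' ' = P[(ctp + 1).toNat] :=
    PySem.List.pyGetD_eq_getElem P ' ' h0 hlt
  -- peel the first iteration (i = ctp+1)
  rw [PySem.List.pyRange_one_cons (by exact hlt), List.foldl_cons]
  -- on the rest of the range the positional tests are false
  rw [PySem.List.foldl_congr_mem _ _
      (fun acc i => acc ++ [(fun c => if c = ' ' then '─' else c) (PySem.List.pyGetD P i ' ')]) _
      (by
        intro acc x hx
        rw [PySem.List.mem_pyRange_one] at hx
        have hx1 : (x == ctp + 1) = false := by simp; omega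
        have hx2 : (x == (P.length : Int)) = false := by simp; omega
        simp only [hx1, hx2, Bool.false_or, Bool.false_and]
        by_cases hc : PySem.List.pyGetD P x ' ' = ' '
        · simp [hc]
        · simp [hc])]
  -- the remaining loop is a map over the dropped suffix
  rw [PySem.List.foldl_pyRange_pyGetD' P ' '
      (fun acc c => acc ++ [(fun c => if c = ' ' then '─' else c) c]) _ (by omega : (0:Int) ≤ ctp + 1 + 1)]
  rw [PySem.List.foldl_append_singleton_eq_map]
  -- evaluate the peeled first iteration
  have harr : ((ctp+1:Int) == ctp + 1 || (ctp+1:Int) == (P.length : Int)) = true := by simp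
  simp only [harr, Bool.true_and, hget]
  have hsuffix : (ctp + 1 + 1).toNat = (ctp + 1).toNat + 1 := by omega
  rw [hsuffix]
  rw [PySem.List.slice_to _ (by norm_num : (0:Int) ≤ 1), PySem.List.slice_from_one, htail, hdropcons]
  simp only [Int.toNat_one]
  simp only [List.take_succ_cons, List.take_zero, List.tail_cons]
  by_cases hc : P[(ctp + 1).toNat] = ' '
  · rw [hc]; simp
  · have hbe : (P[(ctp + 1).toNat] == ' ') = false := by simp [hc]
    simp [hbe, hc]

-- ===== VERDICT (by name: the statement is the Claim_ definition above) =====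
theorem fill_line_with_arrows_spec : Claim_unchanged_fill_line_with_arrows := by
  intro line arrow line_length call_task_position _hDom _hPre hD
  unfold D_fill_line_with_arrows at hD
  have hpos : -1 ≤ call_task_position := by omega
  simp only [fill_line_with_arrows, fill_line_with_arrows_alt]
  by_cases hlt : call_task_position + 1 < ((pvLjust line line_length).length : Int)
  · rw [if_pos (by exact hlt), if_neg (by omega)]
    rw [pv_replace_single]
    exact congrArg String.ofList
      (pv_core (pvLjust line line_length) arrow.toList call_task_position hpos hlt)
  · rw [if_neg hlt, if_pos (by omega)]

theorem fill_line_with_arrows_changed : Claim_changed_fill_line_with_arrows := by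
  unfold Claim_changed_fill_line_with_arrows; decide

theorem fill_line_with_arrows_tight : Claim_exact_fill_line_with_arrows := by
  intro line arrow ll ctp _hDom hPre hD
  unfold Pre_fill_line_with_arrows at hPre
  unfold D_fill_line_with_arrows at hD
  set P := pvLjust line ll with hPdef
  have hL : (P.length : Int) = max (line.toList.length : Int) ll := by
    simp [hPdef, pvLjust]; omega
  set k : Nat := (-(ctp+1)).toNat with hkdef
  have hk : (k : Int) = -(ctp+1) := by omega
  have hk1 : 1 ≤ k := by omega
  have hkL : k ≤ P.length := by omega
  have hL1 : 1 ≤ P.length := le_trans hk1 hkL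
  have hidx : P.length - k < P.length := by omega
  have hdrop : List.drop (P.length - k) P = P[P.length - k] :: List.drop (P.length - k + 1) P :=
    List.drop_eq_getElem_cons hidx
  -- the character both programs special-case
  have hget : PySem.List.pyGetD P (ctp + 1) ' ' = P[P.length - k] := by
    simp only [PySem.List.pyGetD, PySem.List.pyGet?, PySem.List.pyIdx?]
    rw [if_neg (by omega : ¬ (0:Int) ≤ ctp + 1), if_pos (by omega : -((P.length:Nat) : Int) ≤ ctp + 1), ← hkdef]
    simp [List.getElem?_eq_getElem hidx]
  -- weight of the special-cased slot (same on both sides)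
  set W : List Char := if P[P.length - k] = ' ' then arrow.toList else [P[P.length - k]] with hWdef
  -- ===== length of A's result =====
  have hA : (fill_line_with_arrows line arrow ll ctp).toList.length
      = (PySem.List.slice P none (some ctp)).length + W.length + (P.length + k - 1) := by
    simp only [fill_line_with_arrows]
    rw [if_pos (by omega : ((pvLjust line ll).length : Int) > ctp + 1)]
    rw [String.toList_ofList]
    rw [PySem.List.pyRange_one_cons (by omega : ctp + 1 < ((pvLjust line ll).length : Int)), List.foldl_cons]
    rw [PySem.List.foldl_congr_mem _ _
        (fun acc i => acc ++ [(fun c => if c = ' ' then '─' else c) (PySem.List.pyGetD (pvLjust line ll) i ' ')]) _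
        (by
          intro acc x hx
          rw [PySem.List.mem_pyRange_one] at hx
          have hx1 : (x == ctp + 1) = false := by simp; omega
          have hx2 : (x == ((pvLjust line ll).length : Int)) = false := by simp; omega
          simp only [hx1, hx2, Bool.false_or, Bool.false_and]
          by_cases hc : PySem.List.pyGetD (pvLjust line ll) x ' ' = ' '
          · simp [hc]
          · simp [hc])]
    rw [PySem.List.foldl_append_singleton_eq_map]
    -- first iteration value
    simp only [← hPdef, hget]
    by_cases hc : P[P.length - k] = ' '
    · simp [hc, hWdef, List.length_append]
      omega
    · have hbe : (P[P.length - k] == ' ') = false := by simp [hc]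
      simp [hbe, hc, hWdef, List.length_append]
      omega
  -- ===== length of B's result =====
  have hB : (fill_line_with_arrows_alt line arrow ll ctp).toList.length
      = (PySem.List.slice P none (some ctp)).length + W.length + (k - 1) := by
    simp only [fill_line_with_arrows_alt]
    rw [if_neg (by omega : ¬ ((pvLjust line ll).length : Int) ≤ ctp + 1)]
    rw [String.toList_ofList]
    have htail : PySem.List.slice (pvLjust line ll) (some (ctp + 1)) none = List.drop (P.length - k) P := by
      rw [PySem.List.slice_some_none, ← hPdef]
      congr 1
      have : ctp + 1 = -(k : Int) := by omega
      rw [this, PySem.List.clampIdx_neg_natCast _ _ (by omega)]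
    rw [htail, PySem.List.slice_to _ (by norm_num : (0:Int) ≤ 1), PySem.List.slice_from_one, hdrop]
    simp only [Int.toNat_one, List.take_succ_cons, List.take_zero, List.tail_cons]
    have hrep : (PySem.Chars.replace (List.drop (P.length - k + 1) P) [' '] ['─']).length
        = k - 1 := by
      rw [pv_replace_single, List.length_map, List.length_drop]; omega
    by_cases hc : P[P.length - k] = ' '
    · simp [hc, hWdef, List.length_append, hrep, ← hPdef]
      omega
    · simp [hc, hWdef, List.length_append, hrep, ← hPdef]
      omega
  intro heq
  have : (fill_line_with_arrows line arrow ll ctp).toList.length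
      = (fill_line_with_arrows_alt line arrow ll ctp).toList.length := by rw [heq]
  omega
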